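-- pv_equiv track=rewrite | github.com/judismar/chpr | worst-case-time-emulations/deterministic_perfect_hashing.py | findq
-- ===== SOURCE A (Python) =====
-- def findq(keys, u):
-- 	n = len(keys)
-- 	q = n-1
-- 	collided = True
-- 	while collided: #at most n^2 log u loops guarantee
-- 		q += 1
-- 		collided = False
-- 		l = [None]*q
-- 		aux = None
-- 		for x in keys:
-- 			aux = l[x % q]
-- 			if aux != None: #collision
-- 				collided = True
-- 				break
-- 			l[x % q] = x
-- 	return q
-- ===== SOURCE B (Python) =====
-- def findq(keys, u):
--     # collect all pairwise differences x - b (each unordered pair once)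
--     diffs = []
--     rest = list(keys)
--     while rest:
--         x = rest.pop(0)
--         for b in rest:
--             diffs.append(x - b)
--     # smallest q >= n dividing no pairwise difference
--     q = len(keys)
--     while any(d % q == 0 for d in diffs):
--         q += 1
--     return q
-- ===== Notes on version B (the rewrite author's own statement) =====
-- stated objective: alternative
-- what changed: B replaces A's per-candidate bucketing into a fresh size-q array by precomputing all pairwise key differences once and accepting the first q >= n that divides none of them.
import Mathlib
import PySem

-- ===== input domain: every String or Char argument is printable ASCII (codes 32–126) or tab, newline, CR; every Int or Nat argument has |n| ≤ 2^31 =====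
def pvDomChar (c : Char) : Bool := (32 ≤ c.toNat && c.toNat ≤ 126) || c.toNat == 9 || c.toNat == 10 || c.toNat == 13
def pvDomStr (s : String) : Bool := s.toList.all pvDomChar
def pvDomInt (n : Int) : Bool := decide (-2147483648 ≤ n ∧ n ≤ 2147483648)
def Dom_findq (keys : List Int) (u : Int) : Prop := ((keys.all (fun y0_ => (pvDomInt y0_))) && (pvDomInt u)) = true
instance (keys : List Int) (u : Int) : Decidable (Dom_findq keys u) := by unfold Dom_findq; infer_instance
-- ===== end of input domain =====

-- B differs from A only in means, not value; equivalence is on the return value (A mutates nothing observable).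

-- ===== PORT A =====
-- the inner 'for x in keys: aux = l[x % q]; if aux != None: collided = True; break; l[x % q] = x'
def findqCollide (q : Int) : List Int → List (Option Int) → Bool
  | [], _ => false
  | x :: rest, l =>
    let aux := PySem.List.pyGetD l (PySem.Int.mod x q) none
    if aux ≠ none then true
    else findqCollide q rest (PySem.List.pySetD l (PySem.Int.mod x q) (some x))

-- the 'while collided:' loop; fuel only makes the recursion total (never exhausted on Nodup keys)
def findqLoop (keys : List Int) : Nat → Int → Int
  | 0, q => q + 1
  | f + 1, q =>
    let q' := q + 1
    if findqCollide q' keys (List.replicate q'.toNat none) then findqLoop keys f q' else q'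

def findq (keys : List Int) (u : Int) : Int :=
  findqLoop keys (2 * (keys.map Int.natAbs).sum + keys.length + 2) ((keys.length : Int) - 1)

-- ===== PORT B =====
-- 'while rest: x = rest.pop(0); for b in rest: diffs.append(x - b)'
def findqDiffs : List Int → List Int
  | [] => []
  | x :: rest => rest.map (fun b => x - b) ++ findqDiffs rest

-- 'while any(d % q == 0 for d in diffs): q += 1'; same fuel guard for totality
def findqLoopAlt (diffs : List Int) : Nat → Int → Int
  | 0, q => q
  | f + 1, q =>
    if diffs.any (fun d => PySem.Int.mod d q == 0) then findqLoopAlt diffs f (q + 1) else q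

def findq_alt (keys : List Int) (u : Int) : Int :=
  findqLoopAlt (findqDiffs keys) (2 * (keys.map Int.natAbs).sum + keys.length + 2) (keys.length : Int)

-- ===== PRECONDITION & SPEC =====
-- (no Pre_: on duplicate keys Python A loops forever and returns nothing, so nothing is claimed there;
--  the fuel-guarded ports still agree on every input, which is what Claim_equal_findq states)
def Spec_findq (keys : List Int) (u : Int) (out : Int) : Prop := out = findq_alt keys u
instance (keys : List Int) (u : Int) (out : Int) : Decidable (Spec_findq keys u out) := by unfold Spec_findq; infer_instance

-- ===== CLAIM (what is proved, stated in full; the proofs are below) =====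
def Claim_equal_findq : Prop := ∀ (keys : List Int) (u : Int), Dom_findq keys u → Spec_findq keys u (findq keys u)

-- ===== LEMMAS AND PROOFS =====

-- A's bucket scan detects exactly a repeated residue (given an all-empty invariant on l's untouched slots)
theorem findqCollide_false_iff (q : Int) (hq : 0 < q) :
    ∀ (keys : List Int) (l : List (Option Int)), l.length = q.toNat →
      (findqCollide q keys l = false ↔
        (List.Pairwise (fun a b => PySem.Int.mod a q ≠ PySem.Int.mod b q) keys ∧
         ∀ x ∈ keys, PySem.List.pyGetD l (PySem.Int.mod x q) none = none)) := by
  intro keys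
  induction keys with
  | nil => intro l hl; simp [findqCollide]
  | cons x rest ih =>
    intro l hl
    have hx0 : 0 ≤ PySem.Int.mod x q := PySem.Int.mod_nonneg x hq
    have hxlt : PySem.Int.mod x q < q := PySem.Int.mod_lt x hq
    have hxl : (PySem.Int.mod x q).toNat < l.length := by omega
    have hget : PySem.List.pyGetD l (PySem.Int.mod x q) none = l[(PySem.Int.mod x q).toNat] :=
      PySem.List.pyGetD_eq_getElem _ _ hx0 (by omega)
    rcases hcase : l[(PySem.Int.mod x q).toNat] with _ | v
    · -- empty slot: the scan stores x and recurses on the updated list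
      have hset : PySem.List.pySetD l (PySem.Int.mod x q) (some x) =
          l.set (PySem.Int.mod x q).toNat (some x) := PySem.List.pySetD_of_nonneg _ _ hx0
      have hstep : findqCollide q (x :: rest) l =
          findqCollide q rest (l.set (PySem.Int.mod x q).toNat (some x)) := by
        simp [findqCollide, hget, hcase, hset]
      have hlen' : (l.set (PySem.Int.mod x q).toNat (some x)).length = q.toNat := by
        simpa using hl
      have ihl := ih (l.set (PySem.Int.mod x q).toNat (some x)) hlen'
      -- how a slot of the updated array reads
      have hread : ∀ y : Int,
          PySem.List.pyGetD (l.set (PySem.Int.mod x q).toNat (some x)) (PySem.Int.mod y q) none =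
            if (PySem.Int.mod x q).toNat = (PySem.Int.mod y q).toNat then some x
            else PySem.List.pyGetD l (PySem.Int.mod y q) none := by
        intro y
        have hy0 : 0 ≤ PySem.Int.mod y q := PySem.Int.mod_nonneg y hq
        have hylt : PySem.Int.mod y q < q := PySem.Int.mod_lt y hq
        rw [PySem.List.pyGetD_eq_getElem _ _ hy0 (by simp; omega),
          List.getElem_set (by simp; omega),
          PySem.List.pyGetD_eq_getElem _ _ hy0 (by omega)]
      have htoNat : ∀ y : Int,
          ((PySem.Int.mod x q).toNat = (PySem.Int.mod y q).toNat) ↔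
            PySem.Int.mod x q = PySem.Int.mod y q := by
        intro y
        have hy0 : 0 ≤ PySem.Int.mod y q := PySem.Int.mod_nonneg y hq
        omega
      rw [hstep, ihl]
      constructor
      · rintro ⟨hpw, hslots⟩
        have hslots' : ∀ y ∈ rest,
            PySem.Int.mod y q ≠ PySem.Int.mod x q ∧
            PySem.List.pyGetD l (PySem.Int.mod y q) none = none := by
          intro y hy
          have := hslots y hy
          rw [hread y] at this
          by_cases hne : (PySem.Int.mod x q).toNat = (PySem.Int.mod y q).toNat
          · rw [if_pos hne] at this; exact absurd this (by simp)
          · rw [if_neg hne] at this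
            exact ⟨fun hc => hne ((htoNat y).mpr hc.symm), this⟩
        refine ⟨List.pairwise_cons.mpr ⟨fun y hy => fun hc => (hslots' y hy).1 hc.symm, hpw⟩, ?_⟩
        intro z hz
        rcases List.mem_cons.mp hz with hz | hz
        · subst hz; rw [hget, hcase]
        · exact (hslots' z hz).2
      · rintro ⟨hpw, hslots⟩
        rcases List.pairwise_cons.mp hpw with ⟨hxrest, hpwrest⟩
        refine ⟨hpwrest, ?_⟩
        intro y hy
        rw [hread y, if_neg (fun hc => hxrest y hy ((htoNat y).mp hc))]
        exact hslots y (List.mem_cons_of_mem _ hy)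
    · -- occupied slot: collision
      constructor
      · intro h
        simp [findqCollide, hget, hcase] at h
      · rintro ⟨_, hslots⟩
        have := hslots x (List.mem_cons_self ..)
        rw [hget, hcase] at this
        simp at this

-- on the all-empty array the scan is exactly "residues pairwise distinct"
theorem findqCollide_replicate (q : Int) (hq : 0 < q) (keys : List Int) :
    (findqCollide q keys (List.replicate q.toNat none) = false ↔
      List.Pairwise (fun a b => PySem.Int.mod a q ≠ PySem.Int.mod b q) keys) := by
  rw [findqCollide_false_iff q hq keys (List.replicate q.toNat none) (by simp)]
  constructor
  · exact fun h => h.1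
  · intro h
    refine ⟨h, fun x hx => ?_⟩
    have hx0 : 0 ≤ PySem.Int.mod x q := PySem.Int.mod_nonneg x hq
    have hxlt : PySem.Int.mod x q < q := PySem.Int.mod_lt x hq
    rw [PySem.List.pyGetD_eq_getElem _ _ hx0 (by simp; omega)]
    simp

-- B's divisibility test over the difference list, as a Pairwise statement
theorem findqDiffs_any_false_iff (q : Int) (keys : List Int) :
    ((findqDiffs keys).any (fun d => PySem.Int.mod d q == 0) = false ↔
      List.Pairwise (fun a b => PySem.Int.mod (a - b) q ≠ 0) keys) := by
  induction keys with
  | nil => simp [findqDiffs]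
  | cons x rest ih =>
    simp only [findqDiffs, List.any_append, Bool.or_eq_false_iff, List.any_map,
      List.pairwise_cons, ih]
    constructor
    · rintro ⟨h1, h2⟩
      refine ⟨fun y hy => ?_, h2⟩
      have := List.any_eq_false.mp h1 y hy
      simpa using this
    · rintro ⟨h1, h2⟩
      refine ⟨List.any_eq_false.mpr fun y hy => by simpa using h1 y hy, h2⟩

-- same residue ⇔ q divides the difference
theorem residue_ne_iff (q : Int) (hq : 0 < q) (a b : Int) :
    (PySem.Int.mod a q ≠ PySem.Int.mod b q) ↔ PySem.Int.mod (a - b) q ≠ 0 := by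
  rw [PySem.Int.mod_eq_emod_of_pos hq, PySem.Int.mod_eq_emod_of_pos hq,
    PySem.Int.mod_eq_emod_of_pos hq]
  rw [not_iff_not]
  exact Int.emod_eq_emod_iff_emod_sub_eq_zero

-- the two loop conditions agree at every positive candidate
theorem cond_eq (keys : List Int) (q : Int) (hq : 0 < q) :
    findqCollide q keys (List.replicate q.toNat none) =
      (findqDiffs keys).any (fun d => PySem.Int.mod d q == 0) := by
  have h1 := findqCollide_replicate q hq keys
  have h2 := findqDiffs_any_false_iff q keys
  have hpw : (List.Pairwise (fun a b => PySem.Int.mod a q ≠ PySem.Int.mod b q) keys ↔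
      List.Pairwise (fun a b => PySem.Int.mod (a - b) q ≠ 0) keys) := by
    constructor
    · exact fun h => h.imp (fun {a b} hab => (residue_ne_iff q hq a b).mp hab)
    · exact fun h => h.imp (fun {a b} hab => (residue_ne_iff q hq a b).mpr hab)
  rcases hA : findqCollide q keys (List.replicate q.toNat none) with _ | _
  · rcases hB : (findqDiffs keys).any (fun d => PySem.Int.mod d q == 0) with _ | _
    · rfl
    · exact absurd (h2.mpr (hpw.mp (h1.mp hA))) (by simp [hB])
  · rcases hB : (findqDiffs keys).any (fun d => PySem.Int.mod d q == 0) with _ | _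
    · exact absurd (h1.mpr (hpw.mpr (h2.mp hB))) (by simp [hA])
    · rfl

-- the two while loops stay aligned (A tests after incrementing, B before)
theorem loop_eq (keys : List Int)
    (hc : ∀ r : Int, 0 < r →
      findqCollide r keys (List.replicate r.toNat none) =
        (findqDiffs keys).any (fun d => PySem.Int.mod d r == 0)) :
    ∀ (f : Nat) (q : Int), 0 ≤ q → findqLoop keys f q = findqLoopAlt (findqDiffs keys) f (q + 1) := by
  intro f
  induction f with
  | zero => intro q _; simp [findqLoop, findqLoopAlt]
  | succ f ih =>
    intro q hq
    simp only [findqLoop, findqLoopAlt]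
    rw [hc (q + 1) (by omega)]
    rcases h : (findqDiffs keys).any (fun d => PySem.Int.mod d (q + 1) == 0) with _ | _
    · simp
    · simpa using ih (q + 1) (by omega)

-- ===== VERDICT (by name: the statement is the Claim_ definition above) =====
theorem findq_spec : Claim_equal_findq := by
  intro keys u _
  unfold Spec_findq findq findq_alt
  rcases keys with _ | ⟨x, rest⟩
  · simp [findqLoop, findqLoopAlt, findqCollide, findqDiffs]
  · have hlen : (0 : Int) ≤ ((x :: rest).length : Int) - 1 := by
      simp
    have := loop_eq (x :: rest)
      (fun r hr => cond_eq (x :: rest) r hr)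
      (2 * ((x :: rest).map Int.natAbs).sum + (x :: rest).length + 2)
      (((x :: rest).length : Int) - 1) hlen
    rw [this]
    norm_num
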